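-- pv_equiv track=rewrite | github.com/vroomvroom314/Python-code-MiniProjects | Python Problems -SA/Week 5/lab5.py | areLegalValues
-- ===== SOURCE A (Python) =====
-- def areLegalValues(values):
-- #finds whether or not values given are legal for soduku
--     prevVals =[]
--         #used to check if duplicates in values appear
--
--     for i in range (len(values)):
--         if (values[i] != 0 and values[i] not in prevVals):
--             prevVals.append(values[i])
--             #adds each digit in values if it hasn't appeared yet
--         elif (values[i] == 0):
--             continue
--             #skips 0s
--         else:
--             return False
--             #if a digit appears more than once in values, it's not legal
--
--     return True
-- ===== SOURCE B (Python) =====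
-- def areLegalValues(values):
--     nz = [v for v in values if v != 0]
--     return len(nz) == len(set(nz))
-- ===== Notes on version B (the rewrite author's own statement) =====
-- stated objective: idiomatic
-- what changed: Replaces the explicit early-return scan that maintains a seen-list with a one-liner comparing the count of nonzero values against the count of distinct nonzero values.
import Mathlib
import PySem

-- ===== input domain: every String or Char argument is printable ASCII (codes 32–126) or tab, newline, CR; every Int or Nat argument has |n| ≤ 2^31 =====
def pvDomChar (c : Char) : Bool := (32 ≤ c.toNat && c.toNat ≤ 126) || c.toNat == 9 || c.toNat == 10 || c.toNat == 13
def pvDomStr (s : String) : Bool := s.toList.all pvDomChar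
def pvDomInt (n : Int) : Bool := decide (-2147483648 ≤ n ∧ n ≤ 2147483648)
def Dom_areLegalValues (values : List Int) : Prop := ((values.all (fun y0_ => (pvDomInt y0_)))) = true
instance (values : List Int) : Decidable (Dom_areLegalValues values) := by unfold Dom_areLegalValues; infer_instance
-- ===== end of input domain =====

-- B is the idiomatic one-liner: compare the number of nonzero values with the number of
-- distinct nonzero values, instead of A's early-return scan over a growing seen-list.

-- ===== PORT A =====
-- loop over the remaining values with the accumulated prevVals, as in A
def areLegalValuesGo (prevVals : List Int) : List Int → Bool
  | [] => true
  | v :: rest =>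
    if v ≠ 0 ∧ v ∉ prevVals then areLegalValuesGo (prevVals ++ [v]) rest
    else if v = 0 then areLegalValuesGo prevVals rest
    else false

def areLegalValues (values : List Int) : Bool := areLegalValuesGo [] values

-- ===== PORT B =====
def areLegalValues_alt (values : List Int) : Bool :=
  let nz := values.filter (fun v => v ≠ 0)
  nz.length == (PySem.Set.ofList nz).length

-- ===== PRECONDITION & SPEC =====
def Spec_areLegalValues (values : List Int) (out : Bool) : Prop := out = areLegalValues_alt values
instance (values : List Int) (out : Bool) : Decidable (Spec_areLegalValues values out) := by unfold Spec_areLegalValues; infer_instance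

-- ===== CLAIM (what is proved, stated in full; the proofs are below) =====
def Claim_equal_areLegalValues : Prop := ∀ (values : List Int), Dom_areLegalValues values → Spec_areLegalValues values (areLegalValues values)

-- ===== LEMMAS AND PROOFS =====

-- A's loop decides Nodup of prevVals ++ the nonzero values, provided prevVals is nodup
theorem areLegalValuesGo_eq (l : List Int) : ∀ (prev : List Int), prev.Nodup →
    areLegalValuesGo prev l = decide ((prev ++ l.filter (fun v => v ≠ 0)).Nodup) := by
  induction l with
  | nil =>
    intro prev hp
    simp [areLegalValuesGo, hp]
  | cons v rest ih =>
    intro prev hp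
    by_cases hv : v = 0
    · subst hv
      simp [areLegalValuesGo, ih prev hp]
    · by_cases hm : v ∈ prev
      · have hnd : ¬ ((prev ++ v :: List.filter (fun v => !decide (v = 0)) rest).Nodup) := by
          rw [List.nodup_append]
          rintro ⟨-, -, hdisj⟩
          exact hdisj v hm v (List.mem_cons_self ..) rfl
        simp [areLegalValuesGo, hv, hm, hnd]
      · have hp' : (prev ++ [v]).Nodup := by
          rw [List.nodup_append]
          refine ⟨hp, List.nodup_singleton v, fun a ha b hb => ?_⟩
          simp at hb; subst hb
          exact fun h => hm (h ▸ ha)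
        rw [show areLegalValuesGo prev (v :: rest) = areLegalValuesGo (prev ++ [v]) rest from by
          simp [areLegalValuesGo, hv, hm]]
        rw [ih _ hp']
        congr 1
        simp [hv, List.append_assoc]

-- folding Set.add adds at most one element per step
theorem foldl_add_length_le (l : List Int) : ∀ (t : PySem.Set Int),
    (l.foldl PySem.Set.add t).length ≤ t.length + l.length := by
  induction l with
  | nil => intro t; simp
  | cons y l ihl =>
    intro t
    have h1 := ihl (PySem.Set.add t y)
    have h2 : (PySem.Set.add t y).length ≤ t.length + 1 := by
      unfold PySem.Set.add
      split <;> simp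
    simp only [List.foldl_cons, List.length_cons] at *
    omega

-- foldl Set.add counts: length equality characterises Nodup (relative to a nodup seed)
theorem foldl_add_length_eq_iff (xs : List Int) : ∀ (s : PySem.Set Int), List.Nodup s →
    ((xs.foldl PySem.Set.add s).length = s.length + xs.length ↔ (s ++ xs).Nodup) := by
  induction xs with
  | nil => intro s hs; simp [hs]
  | cons x xs ih =>
    intro s hs
    by_cases hm : x ∈ s
    · constructor
      · intro h
        have hx : PySem.Set.add s x = s := by
          unfold PySem.Set.add
          simp [hm]
        rw [List.foldl_cons, hx] at h
        have := foldl_add_length_le xs s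
        simp only [List.length_cons] at h
        omega
      · intro h
        exfalso
        rw [List.nodup_append] at h
        exact h.2.2 x hm x (List.mem_cons_self ..) rfl
    · have hx : PySem.Set.add s x = s ++ [x] := by
        unfold PySem.Set.add
        simp [hm]
      have hs' : List.Nodup (s ++ [x]) := by
        rw [List.nodup_append]
        refine ⟨hs, List.nodup_singleton x, fun a ha b hb => ?_⟩
        simp at hb; subst hb
        exact fun h => hm (h ▸ ha)
      have hih := ih (s ++ [x]) hs'
      rw [List.foldl_cons, hx]
      constructor
      · intro h
        have h2 : ((s ++ [x]) ++ xs).Nodup := by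
          apply hih.mp
          simp only [List.length_append, List.length_cons, List.length_nil] at h ⊢
          omega
        simpa [List.append_assoc] using h2
      · intro h
        have h2 : ((s ++ [x]) ++ xs).Nodup := by simpa [List.append_assoc] using h
        have := hih.mpr h2
        simp only [List.length_append, List.length_cons, List.length_nil] at this ⊢
        omega

theorem ofList_length_eq_iff (xs : List Int) :
    ((PySem.Set.ofList xs).length = xs.length ↔ xs.Nodup) := by
  have := foldl_add_length_eq_iff xs [] (by simp)
  rw [PySem.Set.ofList_eq_foldl]
  simpa using this

-- ===== VERDICT (by name: the statement is the Claim_ definition above) =====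
theorem areLegalValues_spec : Claim_equal_areLegalValues := by
  intro values _
  unfold Spec_areLegalValues areLegalValues areLegalValues_alt
  rw [areLegalValuesGo_eq values [] (by simp)]
  simp only [List.nil_append]
  rw [Bool.eq_iff_iff]
  simp only [beq_iff_eq, decide_eq_true_eq]
  constructor
  · intro h
    exact ((ofList_length_eq_iff _).mpr h).symm
  · intro h
    exact (ofList_length_eq_iff _).mp h.symm
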